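-- pv_equiv track=rewrite | github.com/K-kiron/NHL-Analysis | Milestone2/features/feature_eng2.py | binary2cumulative
-- ===== SOURCE A (Python) =====
-- def binary2cumulative(lst: list) -> list:
--     """
--     Arguments:
--         lst (list)
--
--     Returns: cumulative list wherein the element at index j is the sum of previous elements until reaching a previous 0 entry
--             Ex: [0 1 1 1 1 0 1 1 1] -> [0 1 2 3 4 0 1 2 3]
--     """
--     nlst = []
--     count = 0
--     for i in lst:
--         if i == 1:
--             count += 1
--         else:
--             count = 0
--         nlst.append(count)
--     return nlst
-- ===== SOURCE B (Python) =====
-- from itertools import groupby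
--
--
-- def binary2cumulative(lst: list) -> list:
--     nlst = []
--     for key, grp in groupby(lst, key=lambda x: x == 1):
--         n = len(list(grp))
--         if key:
--             nlst.extend(range(1, n + 1))
--         else:
--             nlst.extend([0] * n)
--     return nlst
-- ===== Notes on version B (the rewrite author's own statement) =====
-- stated objective: alternative
-- what changed: B partitions the list into consecutive runs with itertools.groupby and emits a whole block per run (range(1,n+1) for a run of ones, n zeros otherwise) instead of maintaining a per-element scalar counter.
import Mathlib
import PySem

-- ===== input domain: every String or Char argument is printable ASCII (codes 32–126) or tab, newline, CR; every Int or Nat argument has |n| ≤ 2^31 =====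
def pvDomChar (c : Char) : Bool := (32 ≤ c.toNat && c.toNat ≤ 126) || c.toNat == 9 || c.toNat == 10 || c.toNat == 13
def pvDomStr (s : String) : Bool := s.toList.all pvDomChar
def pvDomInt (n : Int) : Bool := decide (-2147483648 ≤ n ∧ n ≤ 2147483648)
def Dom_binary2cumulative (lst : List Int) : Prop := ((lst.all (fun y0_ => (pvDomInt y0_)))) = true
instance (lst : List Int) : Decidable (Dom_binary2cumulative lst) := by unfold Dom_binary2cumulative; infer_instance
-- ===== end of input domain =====

-- B replaces A's per-element scalar counter by an itertools.groupby run decomposition,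
-- emitting a whole block (range(1,n+1) or n zeros) per consecutive run.

-- ===== PORT A =====
-- A's loop: state (nlst, count); per element update count, append it.
def binary2cumulative (lst : List Int) : List Int :=
  (lst.foldl
    (fun (s : List Int × Int) i =>
      let count := if i == 1 then s.2 + 1 else 0
      (s.1 ++ [count], count))
    ([], 0)).1

-- ===== PORT B =====
-- itertools.groupby(lst, key=lambda x: x == 1): maximal consecutive runs with equal key.
def pyGroupby : List Int → List (Bool × List Int)
  | [] => []
  | i :: t =>
    let key := i == 1
    let run := t.takeWhile (fun x => (x == 1) == key)
    let rest := t.dropWhile (fun x => (x == 1) == key)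
    (key, i :: run) :: pyGroupby rest
termination_by l => l.length
decreasing_by
  simp only [List.length_cons]
  exact Nat.lt_succ_of_le (List.length_dropWhile_le _ _)

-- per group: nlst.extend(range(1, n+1)) for a run of ones, nlst.extend([0]*n) otherwise
def binary2cumulative_alt (lst : List Int) : List Int :=
  (pyGroupby lst).foldl
    (fun nlst g =>
      nlst ++ (if g.1 then (List.range g.2.length).map (fun j : Nat => (j : Int) + 1)
               else List.replicate g.2.length 0))
    []

-- ===== PRECONDITION & SPEC =====
def Spec_binary2cumulative (lst : List Int) (out : List Int) : Prop := out = binary2cumulative_alt lst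
instance (lst : List Int) (out : List Int) : Decidable (Spec_binary2cumulative lst out) := by unfold Spec_binary2cumulative; infer_instance

-- ===== CLAIM (what is proved, stated in full; the proofs are below) =====
def Claim_equal_binary2cumulative : Prop := ∀ (lst : List Int), Dom_binary2cumulative lst → Spec_binary2cumulative lst (binary2cumulative lst)

-- ===== LEMMAS AND PROOFS =====

-- the common reference recursion: the per-element counter
def gspec : Int → List Int → List Int
  | _, [] => []
  | c, i :: t =>
    let c' := if i == 1 then c + 1 else 0
    c' :: gspec c' t

theorem foldl_eq_gspec (t : List Int) : ∀ (acc : List Int) (c : Int),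
    (t.foldl (fun (s : List Int × Int) i =>
      let count := if i == 1 then s.2 + 1 else 0
      (s.1 ++ [count], count)) (acc, c)).1 = acc ++ gspec c t := by
  induction t with
  | nil => intro acc c; simp [gspec]
  | cons i t ih =>
    intro acc c
    simp only [List.foldl_cons, gspec]
    rw [ih]
    simp

theorem a_eq_gspec (lst : List Int) : binary2cumulative lst = gspec 0 lst := by
  unfold binary2cumulative
  simpa using foldl_eq_gspec lst [] 0

theorem gspec_ones (run : List Int) : ∀ (c : Int) (rest : List Int),
    (∀ x ∈ run, x = 1) →
    gspec c (run ++ rest) =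
      (List.range run.length).map (fun j : Nat => c + (j : Int) + 1) ++ gspec (c + run.length) rest := by
  induction run with
  | nil => intro c rest _; simp
  | cons x run ih =>
    intro c rest h
    have hx : x = 1 := h x (by simp)
    subst hx
    simp only [List.cons_append, gspec, beq_self_eq_true, if_true]
    rw [ih (c + 1) rest (fun y hy => h y (by simp [hy]))]
    simp only [List.length_cons, List.range_succ_eq_map, List.map_cons, List.map_map,
      List.cons_append, List.cons.injEq]
    refine ⟨by push_cast; ring, ?_⟩
    congr 1
    · refine List.map_congr_left (fun j _ => ?_)
      simp only [Function.comp_apply]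
      push_cast; ring
    · congr 1; push_cast; ring

theorem gspec_zeros (run : List Int) : ∀ (rest : List Int),
    (∀ x ∈ run, ¬ x = 1) →
    gspec 0 (run ++ rest) = List.replicate run.length 0 ++ gspec 0 rest := by
  induction run with
  | nil => intro rest _; simp
  | cons x run ih =>
    intro rest h
    have hx : ¬ x = 1 := h x (by simp)
    simp only [List.cons_append, gspec, beq_iff_eq, if_neg hx]
    rw [ih rest (fun y hy => h y (by simp [hy]))]
    simp [List.replicate_succ]

-- if rest is empty or starts with a non-1, the incoming counter is irrelevant
theorem gspec_reset (rest : List Int) (c : Int)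
    (h : rest = [] ∨ ∃ r t, rest = r :: t ∧ ¬ r = 1) :
    gspec c rest = gspec 0 rest := by
  rcases h with h | ⟨r, t, rfl, hr⟩
  · subst h; simp [gspec]
  · simp [gspec, hr]

theorem dropWhile_head_false {p : Int → Bool} : ∀ (t : List Int) (r : Int) (t' : List Int),
    t.dropWhile p = r :: t' → p r = false := by
  intro t
  induction t with
  | nil => intro r t' h; simp at h
  | cons x xs ih =>
    intro r t' h
    by_cases hx : p x
    · rw [List.dropWhile_cons_of_pos hx] at h; exact ih r t' h
    · rw [List.dropWhile_cons_of_neg hx] at h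
      cases h
      simpa using hx

-- one groupby step, as it acts on the reference recursion
theorem gspec_step (i : Int) (t : List Int) :
    gspec 0 (i :: t) =
      (if (i == 1) then
          (List.range (i :: t.takeWhile (fun x => (x == 1) == (i == 1))).length).map
            (fun j : Nat => (j : Int) + 1)
        else List.replicate (i :: t.takeWhile (fun x => (x == 1) == (i == 1))).length 0)
      ++ gspec 0 (t.dropWhile (fun x => (x == 1) == (i == 1))) := by
  by_cases hi : i = 1
  · subst hi
    simp only [beq_self_eq_true, if_true]
    have h1 : ∀ x ∈ t.takeWhile (fun x : Int => (x == 1) == true), x = 1 := by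
      intro x hx
      simpa using List.mem_takeWhile_imp hx
    conv_lhs => rw [show t = t.takeWhile (fun x : Int => (x == 1) == true) ++ t.dropWhile (fun x : Int => (x == 1) == true) from (List.takeWhile_append_dropWhile).symm]
    simp only [gspec, beq_self_eq_true, if_true]
    rw [gspec_ones _ (0 + 1) _ h1]
    have hreset : gspec (0 + 1 + (t.takeWhile (fun x : Int => (x == 1) == true)).length)
        (t.dropWhile (fun x : Int => (x == 1) == true)) = gspec 0 (t.dropWhile (fun x : Int => (x == 1) == true)) := by
      apply gspec_reset
      rcases hr : t.dropWhile (fun x : Int => (x == 1) == true) with _ | ⟨r, t'⟩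
      · exact Or.inl rfl
      · refine Or.inr ⟨r, t', rfl, ?_⟩
        have := dropWhile_head_false t r t' hr
        simpa using this
    rw [hreset]
    simp only [List.length_cons, List.range_succ_eq_map, List.map_cons, List.map_map,
      List.cons_append, List.cons.injEq]
    refine ⟨by norm_num, ?_⟩
    congr 1
    refine List.map_congr_left (fun j _ => ?_)
    simp only [Function.comp_apply]
    push_cast; ring
  · have hne : (i == 1) = false := by simpa using hi
    simp only [hne, Bool.false_eq_true, if_false]
    have h0 : ∀ x ∈ t.takeWhile (fun x : Int => (x == 1) == false), ¬ x = 1 := by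
      intro x hx
      simpa using List.mem_takeWhile_imp hx
    conv_lhs => rw [show t = t.takeWhile (fun x : Int => (x == 1) == false) ++ t.dropWhile (fun x : Int => (x == 1) == false) from (List.takeWhile_append_dropWhile).symm]
    simp only [gspec, hne, Bool.false_eq_true, if_false]
    rw [gspec_zeros _ _ h0]
    simp [List.replicate_succ]

theorem gspec_eq_flatMap : ∀ lst : List Int,
    gspec 0 lst = (pyGroupby lst).flatMap
      (fun g => if g.1 then (List.range g.2.length).map (fun j : Nat => (j : Int) + 1)
                else List.replicate g.2.length 0) := by
  intro lst
  induction lst using pyGroupby.induct with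
  | case1 => simp [pyGroupby, gspec]
  | case2 i t _key _run ih =>
    rw [pyGroupby]
    simp only [List.flatMap_cons]
    rw [← ih, gspec_step]

theorem b_eq_flatMap (lst : List Int) :
    binary2cumulative_alt lst = (pyGroupby lst).flatMap
      (fun g => if g.1 then (List.range g.2.length).map (fun j : Nat => (j : Int) + 1)
                else List.replicate g.2.length 0) := by
  unfold binary2cumulative_alt
  simpa using PySem.List.foldl_append_eq_flatMap
    (l := pyGroupby lst) (acc := ([] : List Int))
    (g := fun g : Bool × List Int =>
      if g.1 then (List.range g.2.length).map (fun j : Nat => (j : Int) + 1)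
      else List.replicate g.2.length 0)

-- ===== VERDICT (by name: the statement is the Claim_ definition above) =====
theorem binary2cumulative_spec : Claim_equal_binary2cumulative := by
  intro lst _
  show binary2cumulative lst = binary2cumulative_alt lst
  rw [a_eq_gspec, b_eq_flatMap, gspec_eq_flatMap]
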